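-- pv_equiv track=rewrite | github.com/Fnadona/hackerHankExercises | CounterGame.py | binaryNumber
-- ===== SOURCE A (Python) =====
-- def binaryNumber(n):
-- 	binaryDigits = []
-- 	isPowerOfTwo = True
-- 	ones = 0
-- 	firstOnePosition = 0
-- 	isFirst = True
-- 	count = 0
--
-- 	if(n == 1):
-- 		return 1, True, 0, 0
--
-- 	if(n == 0):
-- 		return 1, False, 0, 0
--
-- 	while(n>1):
-- 		if(n % 2 == 1):
-- 			isPowerOfTwo = False
-- 			ones = ones + 1
--
-- 			if(isFirst):
-- 				isFirst = False
-- 				firstOnePosition = count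
--
-- 		binaryDigits.append(n % 2)
-- 		n = n // 2
-- 		count = count + 1
--
-- 	binaryDigits.append(n)
--
-- 	return len(binaryDigits), isPowerOfTwo, ones, len(binaryDigits) - firstOnePosition - 1
-- ===== SOURCE B (Python) =====
-- def binaryNumber(n):
--     if n <= 1:
--         # one guard covering all of A's base cases, including negatives (the loop never runs there)
--         return 1, n != 0, 0, 0
--     length = n.bit_length()
--     pop = n.bit_count()
--     first = 0 if pop == 1 else _trailing_zeros(n)
--     return length, pop == 1, pop - 1, length - first - 1
--
-- def _trailing_zeros(n):
--     t = 0
--     while n % 2 == 0: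
--         n //= 2
--         t += 1
--     return t
-- ===== Notes on version B (the rewrite author's own statement) =====
-- stated objective: simpler
-- what changed: Replaces A's single fused bit-by-bit while loop with six pieces of state by direct per-property computation: bit_length(), bit_count(), a one-line trailing-zeros helper, and one guard n <= 1 covering all of A's base cases (including negatives).
import Mathlib
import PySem

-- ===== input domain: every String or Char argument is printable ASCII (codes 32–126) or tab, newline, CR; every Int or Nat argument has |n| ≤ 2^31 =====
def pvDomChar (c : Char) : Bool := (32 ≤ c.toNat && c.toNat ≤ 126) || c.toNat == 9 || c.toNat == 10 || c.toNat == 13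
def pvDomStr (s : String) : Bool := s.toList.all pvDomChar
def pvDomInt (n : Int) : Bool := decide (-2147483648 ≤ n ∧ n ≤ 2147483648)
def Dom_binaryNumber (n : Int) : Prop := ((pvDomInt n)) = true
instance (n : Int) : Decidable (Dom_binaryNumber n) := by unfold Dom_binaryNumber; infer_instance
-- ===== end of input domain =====

-- B replaces A's fused bit-by-bit while loop (six pieces of state) by direct per-property
-- computation (bit_length, bit_count, trailing zeros, one guard n <= 1); objective: simpler.

-- ===== PORT A =====
-- the while(n>1) loop of A, carrying its full mutable state
def pvLoopA (n : Int) (digits : List Int) (isPow : Bool) (ones first : Int)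
    (isFirst : Bool) (count : Int) : Int × Bool × Int × Int :=
  if h : n > 1 then
    if PySem.Int.mod n 2 = 1 then
      pvLoopA (PySem.Int.floordiv n 2) (digits ++ [PySem.Int.mod n 2]) false (ones + 1)
        (if isFirst then count else first) false (count + 1)
    else
      pvLoopA (PySem.Int.floordiv n 2) (digits ++ [PySem.Int.mod n 2]) isPow ones
        first isFirst (count + 1)
  else
    (((digits ++ [n]).length : Int), isPow, ones, ((digits ++ [n]).length : Int) - first - 1)
termination_by n.toNat
decreasing_by
  all_goals
    rw [PySem.Int.floordiv_eq_ediv_of_pos (by omega : (0:Int) < 2)]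
    omega

def binaryNumber (n : Int) : Int × Bool × Int × Int :=
  if n = 1 then (1, true, 0, 0)
  else if n = 0 then (1, false, 0, 0)
  else pvLoopA n [] true 0 0 true 0

-- ===== PORT B =====
-- Source B's _trailing_zeros loop; the '1 ≤ n' conjunct is a totality guard only
-- (Source B only calls it with n ≥ 2, where the Python loop terminates the same way)
def pvTz (n : Int) : Int :=
  if h : 1 ≤ n ∧ PySem.Int.mod n 2 = 0 then 1 + pvTz (PySem.Int.floordiv n 2) else 0
termination_by n.toNat
decreasing_by
  rw [PySem.Int.floordiv_eq_ediv_of_pos (by omega : (0:Int) < 2)]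
  have := PySem.Int.mod_eq_emod_of_pos (a := n) (b := 2) (by omega)
  omega

def binaryNumber_alt (n : Int) : Int × Bool × Int × Int :=
  if n ≤ 1 then (1, decide (n ≠ 0), 0, 0)
  else
    let length : Int := (PySem.Int.bitLength n : Int)
    let pop : Int := (PySem.Int.bitCount n : Int)
    let first : Int := if pop = 1 then 0 else pvTz n
    (length, decide (pop = 1), pop - 1, length - first - 1)

-- ===== PRECONDITION & SPEC =====
def Spec_binaryNumber (n : Int) (out : Int × Bool × Int × Int) : Prop := out = binaryNumber_alt n
instance (n : Int) (out : Int × Bool × Int × Int) : Decidable (Spec_binaryNumber n out) := by unfold Spec_binaryNumber; infer_instance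

-- ===== CLAIM (what is proved, stated in full; the proofs are below) =====
def Claim_equal_binaryNumber : Prop := ∀ (n : Int), Dom_binaryNumber n → Spec_binaryNumber n (binaryNumber n)

-- ===== LEMMAS AND PROOFS =====

-- a positive number has at least one set bit
theorem pvBitCount_pos : ∀ (k : Nat) (n : Int), n.toNat = k → 1 ≤ n → 1 ≤ PySem.Int.bitCount n := by
  intro k
  induction k using Nat.strong_induction_on with
  | _ k ih =>
    intro n hk hn
    rcases eq_or_lt_of_le hn with h1 | h2
    · rw [← h1]; decide
    · rw [PySem.Int.bitCount_of_pos (by omega)]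
      have hd : PySem.Int.floordiv n 2 = n / 2 := PySem.Int.floordiv_eq_ediv_of_pos (by omega)
      have := ih (n/2).toNat (by omega) (n/2) rfl (by omega)
      rw [hd]; omega

-- closed-form characterisation of A's loop: on entry count = |digits|, and for n ≥ 1 the loop
-- returns (|digits| + bitLength n, isPow ∧ popcount n = 1, ones + popcount n - 1, and the
-- length minus (position of the first 1 seen, i.e. |digits| + trailing zeros if still unset
-- and some 1 below the top bit exists) minus 1)
theorem pvLoopA_eq : ∀ (k : Nat) (n : Int), n.toNat = k → 1 ≤ n →
    ∀ (digits : List Int) (isPow : Bool) (ones first : Int) (isFirst : Bool),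
    pvLoopA n digits isPow ones first isFirst (digits.length : Int) =
      ((digits.length : Int) + (PySem.Int.bitLength n : Int),
       isPow && decide ((PySem.Int.bitCount n : Int) = 1),
       ones + (PySem.Int.bitCount n : Int) - 1,
       (digits.length : Int) + (PySem.Int.bitLength n : Int) -
         (if isFirst && !decide ((PySem.Int.bitCount n : Int) = 1)
          then (digits.length : Int) + pvTz n else first) - 1) := by
  intro k
  induction k using Nat.strong_induction_on with
  | _ k ih =>
    intro n hk hn digits isPow ones first isFirst
    rcases eq_or_lt_of_le hn with h1 | h2
    · -- n = 1
      subst hk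
      rw [← h1, pvLoopA]
      have hbl : PySem.Int.bitLength (1:Int) = 1 := by decide
      have hbc : PySem.Int.bitCount (1:Int) = 1 := by decide
      simp only [hbl, hbc, List.length_append]
      norm_num
    · -- n ≥ 2
      have hd : PySem.Int.floordiv n 2 = n / 2 := PySem.Int.floordiv_eq_ediv_of_pos (by omega)
      have hme : PySem.Int.mod n 2 = n % 2 := PySem.Int.mod_eq_emod_of_pos (by omega)
      have hm1 : (1:Int) ≤ n / 2 := by omega
      have hmk : (n / 2).toNat < k := by omega
      have hbl : (PySem.Int.bitLength n : Int) = (PySem.Int.bitLength (n/2) : Int) + 1 := by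
        rw [PySem.Int.bitLength_of_pos (by omega), hd]; push_cast; ring
      have hbcm1 : 1 ≤ PySem.Int.bitCount (n/2) := pvBitCount_pos _ (n/2) rfl hm1
      have hlen : ((digits ++ [PySem.Int.mod n 2]).length : Int) = (digits.length : Int) + 1 := by
        simp
      rw [pvLoopA, dif_pos (by omega : n > 1)]
      by_cases hodd : PySem.Int.mod n 2 = 1
      · rw [if_pos hodd]
        have hbc : (PySem.Int.bitCount n : Int) = 1 + (PySem.Int.bitCount (n/2) : Int) := by
          rw [PySem.Int.bitCount_of_pos (by omega), hd, hodd]; push_cast; ring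
        have hne : ¬ ((PySem.Int.bitCount n : Int) = 1) := by omega
        have htz : pvTz n = 0 := by
          rw [pvTz, dif_neg (fun hc => by rw [hodd] at hc; exact one_ne_zero hc.2)]
        rw [show (digits.length : Int) + 1 = ((digits ++ [PySem.Int.mod n 2]).length : Int) by omega]
        rw [ih _ hmk (PySem.Int.floordiv n 2) (by rw [hd]) (by omega)]
        rw [hd, hlen, decide_eq_false hne]
        simp only [Prod.mk.injEq, hbl, Bool.false_and, Bool.and_false,
          Bool.not_false, Bool.and_true]
        refine ⟨by omega, by trivial, by omega, ?_⟩
        cases isFirst <;> (try simp) <;> omega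
      · rw [if_neg hodd]
        have heven : PySem.Int.mod n 2 = 0 := by omega
        have hbc : (PySem.Int.bitCount n : Int) = (PySem.Int.bitCount (n/2) : Int) := by
          rw [PySem.Int.bitCount_of_pos (by omega), hd, heven]; push_cast; ring
        have htz : pvTz n = 1 + pvTz (n/2) := by
          rw [pvTz, dif_pos ⟨by omega, heven⟩, hd]
        rw [show (digits.length : Int) + 1 = ((digits ++ [PySem.Int.mod n 2]).length : Int) by omega]
        rw [ih _ hmk (PySem.Int.floordiv n 2) (by rw [hd]) (by omega)]
        rw [hd, hlen, hbc]
        simp only [Prod.mk.injEq, hbl]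
        refine ⟨by omega, by trivial, by trivial, ?_⟩
        cases isFirst <;> (try simp) <;>
          (try split) <;> omega

-- ===== VERDICT (by name: the statement is the Claim_ definition above) =====
theorem binaryNumber_spec : Claim_equal_binaryNumber := by
  unfold Claim_equal_binaryNumber Spec_binaryNumber
  intro n _
  unfold binaryNumber binaryNumber_alt
  by_cases h1 : n = 1
  · subst h1; decide
  by_cases h0 : n = 0
  · subst h0; decide
  rw [if_neg h1, if_neg h0]
  by_cases hle : n ≤ 1
  · -- n < 0 : the while loop never runs
    rw [if_pos hle, pvLoopA, dif_neg (by omega : ¬ n > 1)]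
    simp [h0]
  · -- n ≥ 2
    rw [if_neg hle]
    have h2 : (1:Int) ≤ n := by omega
    have := pvLoopA_eq n.toNat n rfl h2 [] true 0 0 true
    simp only [List.length_nil, Nat.cast_zero] at this
    rw [this]
    simp only [Bool.true_and, zero_add]
    by_cases hp : (PySem.Int.bitCount n : Int) = 1
    · simp [hp]
    · simp only [decide_eq_false hp, Bool.not_false, if_true]
      rw [if_neg hp]
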